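-- pv_equiv track=rewrite | github.com/PerkySue/PerkySue | App/utils/skin_paths.py | skin_pack_lang_from_whisper
-- ===== SOURCE A (Python) =====
-- from typing import Any, Iterator, List, Optional, Tuple
--
-- _WHISPER_TO_SKIN_LOCALES: Tuple[Tuple[str, Tuple[str, ...]], ...] = (
--     ("zh", ("ZH", "CN", "CNR")),
--     ("en", ("EN", "US", "GB", "UK")),
--     ("de", ("DE",)),
--     ("es", ("ES",)),
--     ("fr", ("FR",)),
--     ("nl", ("NL",)),
--     ("it", ("IT",)),
--     ("pt", ("PT",)),
--     ("ja", ("JA", "JP")),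
--     ("ko", ("KO", "KR")),
-- )
--
-- def skin_pack_lang_from_whisper(code: Optional[str]) -> str:
--     """Map last STT language code to an uppercase teaser/pack folder key."""
--     c = (code or "").strip().lower()
--     if not c:
--         return "EN"
--     for prefix, locales in _WHISPER_TO_SKIN_LOCALES:
--         if c == prefix or c.startswith(prefix + "-"):
--             return locales[0]
--     return c[:2].upper() if len(c) >= 2 else c.upper()
-- ===== SOURCE B (Python) =====
-- def skin_pack_lang_from_whisper(code):
--     """Map last STT language code to an uppercase teaser/pack folder key."""
--     c = (code or "").strip().lower()
--     return c[:2].upper() if c else "EN"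
-- ===== Notes on version B (the rewrite author's own statement) =====
-- stated objective: simpler
-- what changed: Eliminates the locale table entirely: each table row's first locale is exactly its prefix uppercased and a match forces c[:2] == prefix, so the function collapses to the closed form c[:2].upper() (or 'EN' when the normalized code is empty).
import Mathlib
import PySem

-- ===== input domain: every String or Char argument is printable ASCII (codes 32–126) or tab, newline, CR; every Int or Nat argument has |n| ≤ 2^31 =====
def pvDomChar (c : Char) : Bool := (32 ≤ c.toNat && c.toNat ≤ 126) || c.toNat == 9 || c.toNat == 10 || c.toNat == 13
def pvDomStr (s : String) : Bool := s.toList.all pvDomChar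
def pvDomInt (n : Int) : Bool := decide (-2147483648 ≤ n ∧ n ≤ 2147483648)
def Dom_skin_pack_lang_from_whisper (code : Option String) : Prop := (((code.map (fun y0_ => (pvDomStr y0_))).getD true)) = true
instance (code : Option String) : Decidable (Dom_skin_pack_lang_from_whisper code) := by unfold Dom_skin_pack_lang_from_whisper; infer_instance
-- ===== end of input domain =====

-- B drops A's locale table entirely: every row's first locale is its prefix uppercased and a
-- match forces c[:2] == prefix, so B is the closed form c[:2].upper() (or "EN" when empty) — simpler.


-- ===== PORT A =====
def pvWhisperTable : List (String × List String) :=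
  [("zh", ["ZH", "CN", "CNR"]),
   ("en", ["EN", "US", "GB", "UK"]),
   ("de", ["DE"]),
   ("es", ["ES"]),
   ("fr", ["FR"]),
   ("nl", ["NL"]),
   ("it", ["IT"]),
   ("pt", ["PT"]),
   ("ja", ["JA", "JP"]),
   ("ko", ["KO", "KR"])]

-- the for-loop with its early return: first matching entry's locales[0] (the rows are nonempty literals, so headD is [0])
def pvScanA (c : String) : List (String × List String) → Option String
  | [] => none
  | (p, locales) :: rest =>
      if c = p ∨ PySem.Str.startswith c (p ++ "-") = true then some (locales.headD "") else pvScanA c rest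

def skin_pack_lang_from_whisper (code : Option String) : String :=
  let c := PySem.Str.lower (PySem.Str.strip (code.getD ""))
  if c = "" then "EN"
  else
    match pvScanA c pvWhisperTable with
    | some r => r
    | none =>
        if 2 ≤ PySem.Str.len c then PySem.Str.upper (PySem.Str.slice c none (some 2))
        else PySem.Str.upper c

-- ===== PORT B =====
def skin_pack_lang_from_whisper_alt (code : Option String) : String :=
  let c := PySem.Str.lower (PySem.Str.strip (code.getD ""))
  if c = "" then "EN" else PySem.Str.upper (PySem.Str.slice c none (some 2))

-- ===== PRECONDITION & SPEC =====
def Spec_skin_pack_lang_from_whisper (code : Option String) (out : String) : Prop := out = skin_pack_lang_from_whisper_alt code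
instance (code : Option String) (out : String) : Decidable (Spec_skin_pack_lang_from_whisper code out) := by unfold Spec_skin_pack_lang_from_whisper; infer_instance

-- ===== CLAIM (what is proved, stated in full; the proofs are below) =====
def Claim_equal_skin_pack_lang_from_whisper : Prop := ∀ (code : Option String), Dom_skin_pack_lang_from_whisper code → Spec_skin_pack_lang_from_whisper code (skin_pack_lang_from_whisper code)

-- ===== LEMMAS AND PROOFS =====

-- a row's test (exact match, or "prefix-…") forces c's first two characters to be the prefix
lemma pvRow_take (c p : String) (hlen : p.toList.length = 2)
    (hcond : c = p ∨ PySem.Str.startswith c (p ++ "-") = true) :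
    c.toList.take 2 = p.toList := by
  rcases hcond with h | h
  · subst h; exact List.take_of_length_le (by omega)
  · rw [PySem.Str.startswith_eq] at h
    simp only [PySem.Chars.startswith, List.isPrefixOf_iff_prefix, String.toList_append] at h
    obtain ⟨t, ht⟩ := h
    rw [← ht, List.append_assoc, List.take_append_of_le_length (by omega),
        List.take_of_length_le (by omega)]

-- any hit of A's scan over a table whose rows map a 2-char prefix to its uppercase returns upper(c[:2])
lemma pvScan_some (tbl : List (String × List String))
    (htbl : ∀ pr ∈ tbl, pr.1.toList.length = 2 ∧ (pr.2.headD "").toList = PySem.Chars.upper pr.1.toList)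
    (c r : String) (hscan : pvScanA c tbl = some r) :
    r.toList = PySem.Chars.upper (c.toList.take 2) := by
  induction tbl with
  | nil => simp [pvScanA] at hscan
  | cons pr rest ih =>
    obtain ⟨p, locales⟩ := pr
    have hrow := htbl (p, locales) (by simp)
    rw [pvScanA] at hscan
    split_ifs at hscan with hc
    · injection hscan with hr
      rw [← hr, hrow.2, pvRow_take c p hrow.1 hc]
    · exact ih (fun q hq => htbl q (List.mem_cons_of_mem _ hq)) hscan

-- ===== VERDICT (by name: the statement is the Claim_ definition above) =====
theorem skin_pack_lang_from_whisper_spec : Claim_equal_skin_pack_lang_from_whisper := by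
  intro code _
  unfold Spec_skin_pack_lang_from_whisper skin_pack_lang_from_whisper skin_pack_lang_from_whisper_alt
  dsimp only
  set c := PySem.Str.lower (PySem.Str.strip (code.getD "")) with hc
  clear_value c
  by_cases hce : c = ""
  · rw [if_pos hce, if_pos hce]
  · rw [if_neg hce, if_neg hce]
    have hslice : (PySem.Str.slice c none (some 2)).toList = c.toList.take 2 := by
      rw [PySem.Str.toList_slice, PySem.Chars.slice_eq_listSlice,
          PySem.List.slice_to c.toList (by norm_num)]
      rfl
    cases hscan : pvScanA c pvWhisperTable with
    | some r =>
        rw [← String.toList_inj, PySem.Str.toList_upper, hslice]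
        exact pvScan_some pvWhisperTable (by decide) c r hscan
    | none =>
        by_cases hlen : 2 ≤ PySem.Str.len c
        · rw [if_pos hlen]
        · rw [if_neg hlen]
          rw [PySem.Str.len_eq] at hlen
          have h1 : c.toList ≠ [] := fun h => hce (by rw [← String.toList_inj, h]; rfl)
          rw [← String.toList_inj, PySem.Str.toList_upper, PySem.Str.toList_upper, hslice,
              List.take_of_length_le (by omega)]
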